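-- pv_equiv track=rewrite | github.com/hotung9108/ThuatToanUngDung | Buoi9/GiaoHang.py | giao_hang
-- ===== SOURCE A (Python) =====
-- from queue import PriorityQueue
--
-- def giao_hang(n, data):
--     A = [[] for i in range(10**6 + 1)]
--     for t, v in data:
--         A[t].append(v)
--     res = 0
--     Q = PriorityQueue()
--     for i in range(10**6, 0, -1):
--         for value in A[i]:
--             Q.put(-value)
--         if not Q.empty():
--             res += -Q.get()
--     return res
-- ===== SOURCE B (Python) =====
-- def giao_hang(n, data):
--     # Classic deadline-scheduling greedy, compressed over the distinct deadline days
--     # instead of sweeping every day of the calendar with a priority queue.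
--     # A package with deadline t can be delivered on any day 1..t (one package per day),
--     # so a deadline before day 1 means the package cannot be delivered at all.
--     byd = {}
--     for t, v in data:
--         if t >= 1:
--             byd.setdefault(t, []).append(v)
--     days = sorted(byd, reverse=True)
--     res = 0
--     rest = []
--     for d, nxt in zip(days, days[1:] + [0]):
--         pool = sorted(rest + byd[d], reverse=True)
--         k = min(d - nxt, len(pool))
--         res += sum(pool[:k])
--         rest = pool[k:]
--     return res
-- ===== Notes on version B (the rewrite author's own statement) =====
-- stated objective: faster
-- what changed: B replaces A's sweep over all 10**6 calendar days with a priority queue by grouping packages by deadline day, sorting the (few) distinct days descending and batch-delivering the min(gap, pending) most valuable packages across each gap, so run time depends on the number of packages instead of the fixed 10**6-day range; Pre_ keeps deadlines in the natural range [0, 10**6]: above it A raises IndexError, and negative deadlines are excluded because A's value there is an accident of Python's negative list indexing while B naturally treats a past deadline as undeliverable.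
-- outside the precondition, e.g. on giao_hang(1, [(-1, 5)]): A returns 5, B returns 0
import Mathlib
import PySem

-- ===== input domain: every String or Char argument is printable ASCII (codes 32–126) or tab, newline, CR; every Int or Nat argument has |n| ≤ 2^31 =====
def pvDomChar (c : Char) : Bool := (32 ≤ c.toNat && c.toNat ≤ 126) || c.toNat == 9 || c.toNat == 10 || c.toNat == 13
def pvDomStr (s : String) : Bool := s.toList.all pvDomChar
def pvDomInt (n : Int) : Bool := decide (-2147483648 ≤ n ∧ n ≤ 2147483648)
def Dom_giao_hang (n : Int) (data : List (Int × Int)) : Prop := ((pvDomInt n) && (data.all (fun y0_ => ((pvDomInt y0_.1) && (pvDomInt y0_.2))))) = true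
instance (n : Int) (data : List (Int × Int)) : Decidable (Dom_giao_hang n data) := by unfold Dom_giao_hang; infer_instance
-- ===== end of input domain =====

-- B replaces A's sweep over all 10^6 calendar days with a descending sort of the distinct
-- deadline days and batch delivery across each gap (objective: faster). Return value only.

-- ===== PORT A =====
-- A's `A = [[] for _ in range(10**6+1)]` together with `A[t].append(v)` is the list of 10**6+1
-- buckets indexed 0..10**6; a negative index wraps per Python list indexing (A[t] = A[t+10**6+1]
-- for -(10**6+1) <= t < 0), t > 10**6 or t < -(10**6+1) raises IndexError. Only indices inside
-- Pre_ (0..10**6, no wrap) are ever claimed about. The bucket list is modelled as the map from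
-- the bucket index to its bucket (a Dict), built by the same left fold over data.
def pvIdxA (t : Int) : Int := if t < 0 then t + 1000001 else t

def pvBucketsA (data : List (Int × Int)) : PySem.Dict Int (List Int) :=
  data.foldl (fun d p => d.modify (pvIdxA p.1) [] (· ++ [p.2])) PySem.Dict.empty

-- A's PriorityQueue holds the negated values, so Q.get() returns the current maximum; it is
-- modelled as the list of stored values kept in decreasing order (put = ordered insert,
-- get = head). Only the multiset of stored values is ever observed.
def pvPush (q : List Int) (v : Int) : List Int :=
  match q with
  | [] => [v]
  | x :: xs => if x < v then v :: x :: xs else x :: pvPush xs v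

-- the loop `for i in range(10**6, 0, -1)` as downward structural recursion on the day counter:
-- step k+1 processes day i = k+1 (push bucket i, then pop the maximum if nonempty).
def pvDaysA (m : PySem.Dict Int (List Int)) : Nat → Int × List Int → Int × List Int
  | 0, st => st
  | k+1, st =>
    match (m.getD ((k : Int) + 1) []).foldl pvPush st.2 with
    | [] => pvDaysA m k (st.1, [])
    | x :: xs => pvDaysA m k (st.1 + x, xs)

def giao_hang (n : Int) (data : List (Int × Int)) : Int :=
  (pvDaysA (pvBucketsA data) 1000000 (0, [])).1

-- ===== PORT B =====
-- `byd.setdefault(t, []).append(v)` for deliverable deadlines t >= 1 (a package whose deadline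
-- is before day 1 can never be delivered)
def pvGroupB (data : List (Int × Int)) : PySem.Dict Int (List Int) :=
  data.foldl (fun dct p =>
    if 1 ≤ p.1 then dct.modify p.1 [] (· ++ [p.2]) else dct) PySem.Dict.empty

-- one iteration of B's loop over zip(days, days[1:] + [0]); the slice indices are nonnegative
-- here (d - nxt ≥ 1 for consecutive distinct sorted deadlines), so pool[:k]/pool[k:] are take/drop
def pvStepB (byd : PySem.Dict Int (List Int)) (st : Int × List Int) (p : Int × Int) : Int × List Int :=
  let pool := PySem.List.sorted (st.2 ++ byd.getD p.1 []) (fun x => x) true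
  let k := min (p.1 - p.2) (pool.length : Int)
  (st.1 + (pool.take k.toNat).sum, pool.drop k.toNat)

def giao_hang_alt (n : Int) (data : List (Int × Int)) : Int :=
  let byd := pvGroupB data
  let days := PySem.List.sorted byd.keys (fun x => x) true
  (List.foldl (pvStepB byd) (0, []) (days.zip (days.drop 1 ++ [0]))).1

-- ===== PRECONDITION & SPEC =====
-- Pre_ keeps every deadline in the task's natural range [0, 10**6]: above 10**6 A raises
-- IndexError, and negative deadlines (outside the natural domain of a deadline) are excluded
-- because the value A returns there is an accident of Python's negative list indexing, while
-- B naturally treats a deadline before day 1 as undeliverable.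
def Pre_giao_hang (n : Int) (data : List (Int × Int)) : Prop :=
  ∀ p ∈ data, 0 ≤ p.1 ∧ p.1 ≤ 1000000

instance (n : Int) (data : List (Int × Int)) : Decidable (Pre_giao_hang n data) := by
  unfold Pre_giao_hang; infer_instance

def pvWitness_giao_hang : Int × (List (Int × Int)) := (3, [(2, 10), (1, 7)])

def Spec_giao_hang (n : Int) (data : List (Int × Int)) (out : Int) : Prop :=
  out = giao_hang_alt n data
instance (n : Int) (data : List (Int × Int)) (out : Int) : Decidable (Spec_giao_hang n data out) := by
  unfold Spec_giao_hang; infer_instance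

-- ===== CLAIM (what is proved, stated in full; the proofs are below) =====
def Claim_equal_giao_hang : Prop := ∀ (n : Int) (data : List (Int × Int)), Dom_giao_hang n data → Pre_giao_hang n data → Spec_giao_hang n data (giao_hang n data)

-- ===== LEMMAS AND PROOFS =====

-- B's compressed sweep as a recursion on the list of remaining event days, seen from the
-- current day counter k of A's loop (proof-only bridge between the two ports).
def pvChain (m : PySem.Dict Int (List Int)) : Nat → List Int → Int → List Int → Int
  | k, [], res, q => res + (q.take (min k q.length)).sum
  | k, d :: ds, res, q =>
      let j := min (k - d.toNat) q.length
      pvChain m d.toNat ds (res + (q.take j).sum)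
        (PySem.List.sorted (q.drop j ++ m.getD d []) (fun x => x) true)

theorem descEq (l1 l2 : List Int) (hp : l1.Perm l2) (h1 : l1.Pairwise (fun a b : Int => b ≤ a))
    (h2 : l2.Pairwise (fun a b : Int => b ≤ a)) : l1 = l2 :=
  List.Perm.eq_of_pairwise (fun _ _ _ _ x y => le_antisymm y x) h1 h2 hp

theorem pvPush_perm (q : List Int) (v : Int) : (pvPush q v).Perm (v :: q) := by
  induction q with
  | nil => simp [pvPush]
  | cons x xs ih =>
    simp only [pvPush]
    split
    · exact List.Perm.refl _
    · exact (ih.cons x).trans (List.Perm.swap v x xs)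

theorem pvPush_pairwise (q : List Int) (v : Int)
    (h : q.Pairwise (fun a b => b ≤ a)) : (pvPush q v).Pairwise (fun a b => b ≤ a) := by
  induction q with
  | nil => simp [pvPush]
  | cons x xs ih =>
    rcases List.pairwise_cons.1 h with ⟨hx, hxs⟩
    simp only [pvPush]
    split
    · rename_i hlt
      refine List.pairwise_cons.2 ⟨?_, h⟩
      intro y hy
      rcases List.mem_cons.1 hy with rfl | hy
      · omega
      · exact le_trans (hx y hy) (le_of_lt hlt)
    · rename_i hge
      refine List.pairwise_cons.2 ⟨?_, ih hxs⟩
      intro y hy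
      have := (pvPush_perm xs v).mem_iff.1 hy
      rcases List.mem_cons.1 this with rfl | hy'
      · omega
      · exact hx y hy'


theorem pvFoldlPush_perm (vs q : List Int) : (vs.foldl pvPush q).Perm (q ++ vs) := by
  induction vs generalizing q with
  | nil => simp
  | cons v vs ih =>
    simp only [List.foldl_cons]
    refine (ih _).trans ?_
    have h1 : (pvPush q v ++ vs).Perm ((v :: q) ++ vs) := (pvPush_perm q v).append_right vs
    refine h1.trans ?_
    simp only [List.cons_append]
    exact (List.perm_middle.symm)

theorem pvFoldlPush_pairwise (vs q : List Int) (h : q.Pairwise (fun a b => b ≤ a)) :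
    (vs.foldl pvPush q).Pairwise (fun a b => b ≤ a) := by
  induction vs generalizing q with
  | nil => exact h
  | cons v vs ih => exact ih _ (pvPush_pairwise q v h)

theorem pvFoldlPush_eq_sorted (vs q : List Int) (h : q.Pairwise (fun a b => b ≤ a)) :
    vs.foldl pvPush q = PySem.List.sorted (q ++ vs) (fun x => x) true := by
  apply descEq
  · exact (pvFoldlPush_perm vs q).trans (PySem.List.sorted_perm (q ++ vs) (fun x => x) true).symm
  · exact pvFoldlPush_pairwise vs q h
  · exact PySem.List.sorted_pairwise_rev (q ++ vs) (fun x => x)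

theorem pvChain_step (m : PySem.Dict Int (List Int)) (k : Nat) (ds : List Int) (res : Int)
    (q : List Int) (hk : 1 ≤ k) (hd : ∀ d ∈ ds.head?, d.toNat ≤ k - 1) :
    pvChain m k ds res q =
      match q with
      | [] => pvChain m (k-1) ds res []
      | x :: xs => pvChain m (k-1) ds (res + x) xs := by
  cases ds with
  | nil =>
    cases q with
    | nil => simp [pvChain]
    | cons x xs =>
      simp only [pvChain]
      have h1 : min k (x :: xs).length = min k (xs.length + 1) := by simp
      have hmin : 1 ≤ min k (xs.length + 1) := by omega
      have : (x :: xs).take (min k (x :: xs).length) = x :: xs.take (min k (xs.length+1) - 1) := by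
        rw [h1]
        cases hmk : min k (xs.length + 1) with
        | zero => omega
        | succ j => simp [List.take_succ_cons]
      rw [this]
      have : min k (xs.length + 1) - 1 = min (k-1) xs.length := by omega
      simp [this, List.sum_cons]
      ring
  | cons d ds' =>
    have hdk : d.toNat ≤ k - 1 := hd d (by simp)
    cases q with
    | nil =>
      simp only [pvChain]
      simp
    | cons x xs =>
      simp only [pvChain]
      have hj : min (k - d.toNat) (x :: xs).length = (min (k - 1 - d.toNat) xs.length) + 1 := by
        simp only [List.length_cons]; omega
      rw [hj]
      simp only [List.take_succ_cons, List.drop_succ_cons, List.sum_cons]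
      ring_nf

theorem pvG (m : PySem.Dict Int (List Int)) (k : Nat) (ds : List Int) (res : Int) (q : List Int)
    (hds : ds.Pairwise (fun a b => b < a))
    (hlo : ∀ d ∈ ds, 1 ≤ d) (hhi : ∀ d ∈ ds, d ≤ (k : Int))
    (hsupp : ∀ i : Int, 1 ≤ i → i ≤ (k : Int) → i ∉ ds → m.getD i [] = [])
    (hq : q.Pairwise (fun a b => b ≤ a)) :
    (pvDaysA m k (res, q)).1 = pvChain m k ds res q := by
  induction k generalizing ds res q with
  | zero =>
    cases ds with
    | nil => simp [pvDaysA, pvChain]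
    | cons d ds' =>
      exfalso
      have h1 := hlo d (by simp)
      have h2 := hhi d (by simp)
      omega
  | succ k ih =>
    by_cases hmem : ((k : Int) + 1) ∈ ds
    · -- day k+1 is the head event
      cases ds with
      | nil => simp at hmem
      | cons d ds' =>
        have hdhead : d = (k : Int) + 1 := by
          rcases List.mem_cons.1 hmem with h | h
          · omega
          · exfalso
            have := (List.pairwise_cons.1 hds).1 _ h
            have := hhi d (by simp)
            omega
        subst hdhead
        -- A side: push bucket, pop
        have hbucket : (m.getD ((k : Int) + 1) []).foldl pvPush q
            = PySem.List.sorted (q ++ m.getD ((k : Int) + 1) []) (fun x => x) true :=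
          pvFoldlPush_eq_sorted _ _ hq
        -- chain side
        have hchain : pvChain m (k+1) (((k : Int) + 1) :: ds') res q
            = pvChain m (k+1) ds' res
                (PySem.List.sorted (q ++ m.getD ((k : Int) + 1) []) (fun x => x) true) := by
          simp only [pvChain]
          have : ((k : Int) + 1).toNat = k + 1 := by omega
          simp [this]
        rw [hchain]
        have hds' : ds'.Pairwise (fun a b => b < a) := (List.pairwise_cons.1 hds).2
        have hlt : ∀ d ∈ ds', d < (k : Int) + 1 := fun d h => (List.pairwise_cons.1 hds).1 d h
        have hstep := pvChain_step m (k+1) ds' res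
          (PySem.List.sorted (q ++ m.getD ((k : Int) + 1) []) (fun x => x) true)
          (by omega)
          (by intro d hd; cases ds' with
              | nil => simp at hd
              | cons e es =>
                simp only [List.head?_cons, Option.mem_def, Option.some.injEq] at hd
                have h1 := hlt e (by simp); have h2 := hlo e (by simp); omega)
        rw [hstep]
        have hpw := PySem.List.sorted_pairwise_rev (q ++ m.getD ((k : Int) + 1) []) (fun x => x)
        have hrec : ∀ (i : Int), 1 ≤ i → i ≤ (k : Int) → i ∉ ds' → m.getD i [] = [] := by
          intro i h1 h2 h3
          refine hsupp i h1 (by omega) ?_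
          intro hc
          rcases List.mem_cons.1 hc with h | h
          · omega
          · exact h3 h
        have hhi' : ∀ d ∈ ds', d ≤ (k : Int) := fun d h => by have := hlt d h; omega
        -- unfold one A step
        show (pvDaysA m (k+1) (res, q)).1 = _
        simp only [pvDaysA]
        rw [hbucket]
        cases hP : PySem.List.sorted (q ++ m.getD ((k : Int) + 1) []) (fun x => x) true with
        | nil => simpa using ih ds' res [] hds' (fun d h => hlo d (List.mem_cons_of_mem _ h)) hhi' hrec (by simp)
        | cons x xs =>
          have hxs : xs.Pairwise (fun a b => b ≤ a) := by
            have := hP ▸ hpw; exact (List.pairwise_cons.1 this).2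
          simpa using ih ds' (res + x) xs hds' (fun d h => hlo d (List.mem_cons_of_mem _ h)) hhi' hrec hxs
    · -- day k+1 has empty bucket
      have hbucket : m.getD ((k : Int) + 1) [] = [] := hsupp _ (by omega) (by omega) hmem
      have hstep := pvChain_step m (k+1) ds res q (by omega)
        (by intro d hd
            cases ds with
            | nil => simp at hd
            | cons e es =>
              simp only [List.head?_cons, Option.mem_def, Option.some.injEq] at hd
              have h1 := hlo e (by simp); have h2 := hhi e (by simp)
              have h3 : e ≠ (k : Int) + 1 := by rintro rfl; exact hmem (by simp)
              omega)
      rw [hstep]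
      have hhi' : ∀ d ∈ ds, d ≤ (k : Int) := by
        intro d h
        have h2 := hhi d h
        have : d ≠ (k : Int) + 1 := by rintro rfl; exact hmem h
        omega
      have hrec : ∀ (i : Int), 1 ≤ i → i ≤ (k : Int) → i ∉ ds → m.getD i [] = [] :=
        fun i h1 h2 h3 => hsupp i h1 (by omega) h3
      show (pvDaysA m (k+1) (res, q)).1 = _
      simp only [pvDaysA]
      rw [hbucket]
      simp only [List.foldl_nil]
      cases q with
      | nil => simpa using ih ds res [] hds hlo hhi' hrec (by simp)
      | cons x xs =>
        have hxs : xs.Pairwise (fun a b => b ≤ a) := (List.pairwise_cons.1 hq).2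
        simpa using ih ds (res + x) xs hds hlo hhi' hrec hxs

theorem pvChain_to_B (m byd : PySem.Dict Int (List Int)) (ds : List Int) (d : Int)
    (res : Int) (q : List Int)
    (hds : (d :: ds).Pairwise (fun a b => b < a)) (hlo : ∀ e ∈ d :: ds, 1 ≤ e)
    (hagree : ∀ e ∈ d :: ds, m.getD e [] = byd.getD e []) :
    pvChain m d.toNat ds res (PySem.List.sorted (q ++ m.getD d []) (fun x => x) true) =
      (List.foldl (pvStepB byd) (res, q) ((d :: ds).zip (ds ++ [0]))).1 := by
  induction ds generalizing d res q with
  | nil =>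
    simp only [List.nil_append, List.zip_cons_cons, List.zip_nil_right, List.foldl_cons,
      List.foldl_nil, pvStepB, pvChain]
    rw [hagree d (by simp)]
    set P := PySem.List.sorted (q ++ byd.getD d []) (fun x => x) true with hP
    have hd1 : 1 ≤ d := hlo d (by simp)
    have h2 : (min (d - 0) ((P.length : Nat) : Int)).toNat = min d.toNat P.length := by omega
    simp only [h2]
  | cons e es ih =>
    have hd1 : 1 ≤ d := hlo d (by simp)
    have he1 : 1 ≤ e := hlo e (by simp)
    have hed : e < d := (List.pairwise_cons.1 hds).1 e (by simp)
    simp only [List.cons_append, List.zip_cons_cons, List.foldl_cons]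
    have hstep : pvStepB byd (res, q) (d, e) =
        (res + ((PySem.List.sorted (q ++ byd.getD d []) (fun x => x) true).take
            (min (d.toNat - e.toNat) (PySem.List.sorted (q ++ byd.getD d []) (fun x => x) true).length)).sum,
          (PySem.List.sorted (q ++ byd.getD d []) (fun x => x) true).drop
            (min (d.toNat - e.toNat) (PySem.List.sorted (q ++ byd.getD d []) (fun x => x) true).length)) := by
      simp only [pvStepB]
      set P := PySem.List.sorted (q ++ byd.getD d []) (fun x => x) true with hP
      have : (min (d - e) (P.length : Int)).toNat = min (d.toNat - e.toNat) P.length := by omega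
      simp [this]
    rw [hstep]
    simp only [pvChain]
    rw [hagree d (by simp)]
    set P := PySem.List.sorted (q ++ byd.getD d []) (fun x => x) true with hP
    have := ih e (res + (P.take (min (d.toNat - e.toNat) P.length)).sum)
      (P.drop (min (d.toNat - e.toNat) P.length))
      (List.pairwise_cons.1 hds).2
      (fun x hx => hlo x (List.mem_cons_of_mem _ hx))
      (fun x hx => hagree x (List.mem_cons_of_mem _ hx))
    rw [hagree e (by simp)] at this
    rw [show m.getD e [] = byd.getD e [] from hagree e (by simp)]
    exact this

theorem pvBucketsA_getD (data : List (Int × Int)) (c : Int) :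
    (pvBucketsA data).getD c [] =
      (data.filter (fun p => pvIdxA p.1 == c)).map (fun p => p.2) := by
  unfold pvBucketsA
  have h1 : data.foldl (fun d p => d.modify (pvIdxA p.1) [] (· ++ [p.2])) PySem.Dict.empty
      = (data.map (fun p => (pvIdxA p.1, p.2))).foldl
          (fun d p => d.modify p.1 [] (fun x => x ++ [p.2])) PySem.Dict.empty := by
    rw [List.foldl_map]
  rw [h1, PySem.Dict.getD_foldl_modify_append]
  simp only [PySem.Dict.getD_empty, List.nil_append, List.filter_map, List.map_map]
  rfl

theorem pvGroupB_eq_foldl_filter (data : List (Int × Int)) :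
    pvGroupB data = (data.filter (fun p => decide (1 ≤ p.1))).foldl
      (fun d q => d.modify q.1 [] (fun x => x ++ [q.2])) PySem.Dict.empty := by
  unfold pvGroupB
  rw [List.foldl_filter]
  simp only [decide_eq_true_eq]

theorem pvGroupB_getD (data : List (Int × Int)) (c : Int) (hc : 1 ≤ c) :
    (pvGroupB data).getD c [] = (data.filter (fun p => p.1 == c)).map (fun p => p.2) := by
  rw [pvGroupB_eq_foldl_filter, PySem.Dict.getD_foldl_modify_append]
  simp only [PySem.Dict.getD_empty, List.nil_append, List.filter_filter]
  congr 1
  apply List.filter_congr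
  intro p _
  rcases eq_or_ne p.1 c with h | h
  · simp [h, hc]
  · simp [h]

theorem pvBucketsEq (data : List (Int × Int)) (c : Int)
    (hc : 1 ≤ c) (hnn : ∀ p ∈ data, 0 ≤ p.1) :
    (pvBucketsA data).getD c [] = (pvGroupB data).getD c [] := by
  rw [pvBucketsA_getD, pvGroupB_getD data c hc]
  congr 1
  apply List.filter_congr
  intro p hp
  have := hnn p hp
  simp [pvIdxA, show ¬ p.1 < 0 by omega]

theorem pvGroupB_getD_eq_nil (data : List (Int × Int)) (c : Int)
    (hc : c ∉ (pvGroupB data).keys) : (pvGroupB data).getD c [] = [] := by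
  apply PySem.Dict.getD_of_not_contains
  by_contra h
  exact hc ((PySem.Dict.contains_iff_mem_keys _ _).1 (by revert h; cases (pvGroupB data).contains c <;> simp))

theorem pvGroupB_keys_mem (data : List (Int × Int)) (c : Int)
    (hmem : c ∈ (pvGroupB data).keys) : 1 ≤ c ∧ ∃ p ∈ data, p.1 = c := by
  rw [pvGroupB_eq_foldl_filter] at hmem
  rw [PySem.Dict.keys_foldl_modify_key _ (fun q => q.1) [] (fun (_ : PySem.Dict Int (List Int)) (q : Int × Int) => (· ++ [q.2]))] at hmem
  simp only [PySem.Dict.keys_empty] at hmem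
  have h1 : c ∈ (data.filter (fun p => decide (1 ≤ p.1))).map (fun q => q.1) := by
    have := (PySem.Set.mem_ofList _ c).1 hmem
    simpa using this
  rcases List.mem_map.1 h1 with ⟨q, hq, rfl⟩
  rcases List.mem_filter.1 hq with ⟨hqd, hq1⟩
  exact ⟨by simpa using hq1, q, hqd, rfl⟩

theorem pvGroupB_keys_nodup (data : List (Int × Int)) : (pvGroupB data).keys.Nodup := by
  rw [pvGroupB_eq_foldl_filter]
  exact PySem.Dict.nodup_keys_foldl_modify_key _ (fun p => p.1) [] (fun (_ : PySem.Dict Int (List Int)) (p : Int × Int) => (· ++ [p.2])) _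
    (by rw [PySem.Dict.keys_empty]; exact List.nodup_nil)

theorem pvMain (n : Int) (data : List (Int × Int))
    (hpre : Pre_giao_hang n data) :
    giao_hang n data = giao_hang_alt n data := by
  set byd := pvGroupB data with hbyd
  set m := pvBucketsA data with hm
  set days := PySem.List.sorted byd.keys (fun x => x) true with hdays
  have hnn : ∀ p ∈ data, 0 ≤ p.1 := fun p hp => (hpre p hp).1
  have hmemdays : ∀ c, c ∈ days ↔ c ∈ byd.keys := fun c => PySem.List.mem_sorted _ _ _ c
  have hlo : ∀ d ∈ days, 1 ≤ d := by
    intro d hd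
    exact (pvGroupB_keys_mem data d ((hmemdays d).1 hd)).1
  have hhi : ∀ d ∈ days, d ≤ ((1000000 : Nat) : Int) := by
    intro d hd
    rcases (pvGroupB_keys_mem data d ((hmemdays d).1 hd)).2 with ⟨p, hp, rfl⟩
    have := (hpre p hp).2
    omega
  have hnodup : days.Nodup := by
    rw [(PySem.List.sorted_perm byd.keys (fun x => x) true).nodup_iff]
    exact pvGroupB_keys_nodup data
  have hdesc : days.Pairwise (fun a b => b < a) := by
    have h1 := PySem.List.sorted_pairwise_rev byd.keys (fun x => x)
    have := (h1.and hnodup)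
    exact this.imp (fun h => by rcases h with ⟨h1, h2⟩; omega)
  have hagree : ∀ e ∈ days, m.getD e [] = byd.getD e [] := by
    intro e he
    exact pvBucketsEq data e (hlo e he) hnn
  have hsupp : ∀ i : Int, 1 ≤ i → i ≤ ((1000000 : Nat) : Int) → i ∉ days → m.getD i [] = [] := by
    intro i h1 h2 h3
    rw [pvBucketsEq data i h1 hnn]
    exact pvGroupB_getD_eq_nil data i (fun hc => h3 ((hmemdays i).2 hc))
  have hA : giao_hang n data = pvChain m 1000000 days 0 [] :=
    pvG m 1000000 days 0 [] hdesc hlo hhi hsupp (by simp)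
  have hAlt : giao_hang_alt n data
      = (List.foldl (pvStepB byd) (0, []) (days.zip (days.drop 1 ++ [0]))).1 := rfl
  rw [hA, hAlt]
  cases hd : days with
  | nil => simp [pvChain]
  | cons d ds =>
    have hd1 : 1 ≤ d := hlo d (by rw [hd]; simp)
    have h1 : pvChain m 1000000 (d :: ds) 0 []
        = pvChain m d.toNat ds 0 (PySem.List.sorted ([] ++ m.getD d []) (fun x => x) true) := by
      simp [pvChain]
    rw [h1]
    rw [pvChain_to_B m byd ds d 0 [] (hd ▸ hdesc) (hd ▸ hlo) (hd ▸ hagree)]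
    simp


-- ===== VERDICT (by name: the statement is the Claim_ definition above) =====
theorem giao_hang_spec : Claim_equal_giao_hang := by
  intro n data _ hpre
  exact pvMain n data hpre
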